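-- pv_equiv track=rewrite | github.com/pypi-data/pypi-mirror-378 | packages/yangke/yangke-2.0.24-py3-none-any.whl/yangke/base.py | is_js_str
-- ===== SOURCE A (Python) =====
-- def is_js_str(code: str):
--     """
--     判断字符串是否是js代码片段
--     :param code:
--     :return:
--     """
--     tag_list = ["html", "div", "button", "label", "address", "body",
--                 "figure", "font", "frame", "img", "input", "legend",
--                 "script", "table", "template", "textarea", ]
--     code = code.lower().strip()
--     if code.endswith(">"):
--         for tag in tag_list:
--             if code.startswith(f"<{tag}"):
--                 return True
--     return False
-- ===== SOURCE B (Python) =====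
-- _TAGS = frozenset(["html", "div", "button", "label", "address", "body",
--                    "figure", "font", "frame", "img", "input", "legend",
--                    "script", "table", "template", "textarea"])
--
--
-- def is_js_str(code: str):
--     """Hash-set variant: instead of scanning the tag list with startswith,
--     slice each possible tag-length prefix (tags are 3..8 chars long) of the
--     text after the opening angle bracket and look it up in a frozenset."""
--     code = code.lower().strip()
--     if not (code.startswith("<") and code.endswith(">")):
--         return False
--     body = code[1:]
--     return any(body[:n] in _TAGS for n in range(3, 9))
-- ===== Notes on version B (the rewrite author's own statement) =====
-- stated objective: alternative
-- what changed: Replaces the linear scan of the 16-tag list with startswith on each bracketed tag by slicing each possible tag-length prefix (lengths 3..8) of the text after the opening angle bracket and looking it up in a frozenset.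
import Mathlib
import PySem

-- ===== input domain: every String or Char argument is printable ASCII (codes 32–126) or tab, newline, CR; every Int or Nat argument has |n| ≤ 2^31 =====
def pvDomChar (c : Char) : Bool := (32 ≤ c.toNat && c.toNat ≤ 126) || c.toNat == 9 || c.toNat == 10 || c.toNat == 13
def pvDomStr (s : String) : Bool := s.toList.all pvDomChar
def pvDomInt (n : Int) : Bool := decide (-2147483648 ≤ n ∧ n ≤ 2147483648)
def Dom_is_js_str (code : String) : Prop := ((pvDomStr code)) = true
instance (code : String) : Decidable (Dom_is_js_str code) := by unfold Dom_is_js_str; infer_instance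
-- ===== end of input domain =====

set_option maxHeartbeats 1000000


-- B replaces A's startswith-scan over the tag list by slicing each possible
-- tag-length prefix (lengths 3..8) of the text after the opening angle bracket and looking it up in a set (objective: alternative).

-- ===== PORT A =====
def pvTagList : List String :=
  ["html", "div", "button", "label", "address", "body",
   "figure", "font", "frame", "img", "input", "legend",
   "script", "table", "template", "textarea"]

def is_js_str (code : String) : Bool :=
  let c := PySem.Str.strip (PySem.Str.lower code)
  if PySem.Str.endswith c ">" then
    -- 'for tag in tag_list: if code.startswith(f"<{tag}"): return True' / fall through to False
    pvTagList.any (fun tag => PySem.Str.startswith c ("<" ++ tag))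
  else false

-- ===== PORT B =====
def pvTagSet : PySem.Set String := PySem.Set.ofList pvTagList

def is_js_str_alt (code : String) : Bool :=
  let c := PySem.Str.strip (PySem.Str.lower code)
  if !(PySem.Str.startswith c "<" && PySem.Str.endswith c ">") then false
  else
    -- body = code[1:]; any(body[:n] in _TAGS for n in range(3, 9))
    let body := PySem.Str.slice c (some 1) none
    (PySem.List.pyRange 3 9 1).any (fun n => pvTagSet.contains (PySem.Str.slice body none (some n)))

-- ===== PRECONDITION & SPEC =====
def Spec_is_js_str (code : String) (out : Bool) : Prop := out = is_js_str_alt code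
instance (code : String) (out : Bool) : Decidable (Spec_is_js_str code out) := by unfold Spec_is_js_str; infer_instance

-- ===== CLAIM (what is proved, stated in full; the proofs are below) =====
def Claim_equal_is_js_str : Prop := ∀ (code : String), Dom_is_js_str code → Spec_is_js_str code (is_js_str code)

-- ===== LEMMAS AND PROOFS =====

theorem pvPrefixHead {α : Type} {a : α} {t cs : List α} (h : a::t <+: cs) : [a] <+: cs := by
  cases cs with
  | nil => simp at h
  | cons c r => simp only [List.cons_prefix_cons] at h ⊢; exact ⟨h.1, List.nil_prefix⟩

theorem pvPrefixTail {α : Type} {a : α} {t cs : List α} (h : a::t <+: cs) : t <+: cs.tail := by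
  cases cs with
  | nil => simp at h
  | cons c r => exact (List.cons_prefix_cons.mp h).2

theorem pvPrefixCons {α : Type} {a : α} {t cs : List α} (h1 : [a] <+: cs) (h2 : t <+: cs.tail) :
    a::t <+: cs := by
  cases cs with
  | nil => simp at h1
  | cons c r => exact List.cons_prefix_cons.mpr ⟨(List.cons_prefix_cons.mp h1).1, h2⟩

theorem pvTakeOfPrefix {α : Type} {t l : List α} (h : t <+: l) : l.take t.length = t :=
  (List.prefix_iff_eq_take.mp h).symm

theorem pvPrefixOfTake {α : Type} {t l : List α} {n : Nat} (h : l.take n = t) : t <+: l :=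
  h ▸ List.take_prefix n l

theorem pvSliceEq (s : String) (n : Int) (hn : 0 ≤ n) (t : String) :
    (PySem.Str.slice (PySem.Str.slice s (some 1) none) none (some n) = t)
    ↔ s.toList.tail.take n.toNat = t.toList := by
  rw [← String.toList_inj]
  simp [PySem.List.slice_from_one, PySem.List.slice_to _ hn]

theorem is_js_str_core_eq (s : String) :
    (if PySem.Str.endswith s ">" then
       pvTagList.any (fun tag => PySem.Str.startswith s ("<" ++ tag))
     else false)
    =
    (if !(PySem.Str.startswith s "<" && PySem.Str.endswith s ">") then false
     else (PySem.List.pyRange 3 9 1).any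
       (fun n => pvTagSet.contains (PySem.Str.slice (PySem.Str.slice s (some 1) none) none (some n)))) := by
  rw [Bool.eq_iff_iff]
  have hrange : PySem.List.pyRange 3 9 1 = [(3:Int),4,5,6,7,8] := by decide
  rw [hrange]
  simp only [pvTagList, pvTagSet, PySem.Set.ofList, List.any, Bool.or_eq_true, Bool.not_and]
  simp [pvSliceEq s 3 (by norm_num), pvSliceEq s 4 (by norm_num), pvSliceEq s 5 (by norm_num),
        pvSliceEq s 6 (by norm_num), pvSliceEq s 7 (by norm_num), pvSliceEq s 8 (by norm_num),
        PySem.Chars.startswith_iff, PySem.Chars.endswith_iff]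
  constructor
  · rintro ⟨he, h|h|h|h|h|h|h|h|h|h|h|h|h|h|h|h⟩ <;>
      (refine ⟨⟨pvPrefixHead h, he⟩, ?_⟩
       have h2 := pvTakeOfPrefix (pvPrefixTail h)
       simp only [List.length_cons, List.length_nil, Nat.zero_add, Nat.reduceAdd] at h2
       simp [h2])
  · rintro ⟨⟨hlt, he⟩, H⟩
    refine ⟨he, ?_⟩
    rcases H with (h|h|h|h|h|h|h|h|h|h|h|h|h|h|h|h)|(h|h|h|h|h|h|h|h|h|h|h|h|h|h|h|h)|(h|h|h|h|h|h|h|h|h|h|h|h|h|h|h|h)|(h|h|h|h|h|h|h|h|h|h|h|h|h|h|h|h)|(h|h|h|h|h|h|h|h|h|h|h|h|h|h|h|h)|(h|h|h|h|h|h|h|h|h|h|h|h|h|h|h|h) <;>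
      (have h3 := pvPrefixCons hlt (pvPrefixOfTake h); simp [h3])

-- ===== VERDICT (by name: the statement is the Claim_ definition above) =====
theorem is_js_str_spec : Claim_equal_is_js_str := by
  intro code _
  unfold Spec_is_js_str is_js_str is_js_str_alt
  exact is_js_str_core_eq _
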